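-- pv_equiv track=rewrite | github.com/jobu-tupakii/ugong-isan | practice37.py | longest_dragon
-- ===== SOURCE A (Python) =====
-- def longest_dragon(text) :
--     sp = text.split()
--     longest = ''
--
--     for word in sp:
--         if len(word) > len(longest):
--             longest = word
--         elif len(word) == len(longest) and word < longest:
--             longest = word
--
--     return longest
-- ===== SOURCE B (Python) =====
-- def longest_dragon(text):
--     sp = text.split()
--     maxlen = max(map(len, sp), default=0)
--     return min((w for w in sp if len(w) == maxlen), default='')
-- ===== Notes on version B (the rewrite author's own statement) =====
-- stated objective: simpler
-- what changed: Replaced the single accumulator loop with its two if-branches by a two-phase computation: first take the maximum word length with a defaulted max, then the lexicographically smallest word of that length with a defaulted min.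
import Mathlib
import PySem

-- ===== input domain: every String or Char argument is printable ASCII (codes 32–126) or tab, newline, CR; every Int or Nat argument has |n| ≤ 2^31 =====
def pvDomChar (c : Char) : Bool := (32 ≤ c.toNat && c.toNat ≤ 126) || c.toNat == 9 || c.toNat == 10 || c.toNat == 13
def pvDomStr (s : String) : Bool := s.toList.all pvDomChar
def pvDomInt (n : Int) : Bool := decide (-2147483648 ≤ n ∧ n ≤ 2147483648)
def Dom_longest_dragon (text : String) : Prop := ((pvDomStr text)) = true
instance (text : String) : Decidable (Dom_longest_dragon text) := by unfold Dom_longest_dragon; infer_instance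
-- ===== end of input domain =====

-- B replaces A's single accumulator loop by a two-phase max-length-then-lexicographic-min
-- computation (objective: simpler). Equal return value on every input; no side effects.

-- ===== PORT A =====
-- loop body of A, as a helper: 'if len(word) > len(longest): …; elif len(word) == len(longest) and word < longest: …'
def pvStep (longest word : String) : String :=
  if PySem.Str.len word > PySem.Str.len longest then word
  else if PySem.Str.len word = PySem.Str.len longest ∧ word < longest then word
  else longest

def longest_dragon (text : String) : String :=
  let sp := PySem.Str.split₀ text
  sp.foldl pvStep ""

-- ===== PORT B =====
def longest_dragon_alt (text : String) : String :=
  let sp := PySem.Str.split₀ text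
  let maxlen := PySem.List.maxD (sp.map PySem.Str.len) (fun x => x) 0
  PySem.List.minD (sp.filter (fun w => PySem.Str.len w == maxlen)) (fun w => w) ""

-- ===== PRECONDITION & SPEC =====
def Spec_longest_dragon (text : String) (out : String) : Prop := out = longest_dragon_alt text
instance (text : String) (out : String) : Decidable (Spec_longest_dragon text out) := by unfold Spec_longest_dragon; infer_instance

-- ===== CLAIM (what is proved, stated in full; the proofs are below) =====
def Claim_equal_longest_dragon : Prop := ∀ (text : String), Dom_longest_dragon text → Spec_longest_dragon text (longest_dragon text)

-- ===== LEMMAS AND PROOFS =====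

-- 'r is at least as good as w' in A's preference order: longer wins, ties go to the
-- lexicographically smaller string.
def pvBetter (r w : String) : Prop :=
  PySem.Str.len w < PySem.Str.len r ∨ (PySem.Str.len r = PySem.Str.len w ∧ r ≤ w)

theorem pvBetter_refl (r : String) : pvBetter r r := Or.inr ⟨rfl, le_refl r⟩

theorem pvBetter_trans {a b c : String} (h1 : pvBetter a b) (h2 : pvBetter b c) : pvBetter a c := by
  rcases h1 with h1 | ⟨h1, h1'⟩ <;> rcases h2 with h2 | ⟨h2, h2'⟩
  · exact Or.inl (by omega)
  · exact Or.inl (by omega)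
  · exact Or.inl (by omega)
  · exact Or.inr ⟨by omega, le_trans h1' h2'⟩

theorem pvBetter_antisymm {a b : String} (h1 : pvBetter a b) (h2 : pvBetter b a) : a = b := by
  rcases h1 with h1 | ⟨_, h1'⟩ <;> rcases h2 with h2 | ⟨_, h2'⟩
  · omega
  · omega
  · omega
  · exact le_antisymm h1' h2'

theorem pvStep_better_left (acc w : String) : pvBetter (pvStep acc w) acc := by
  unfold pvStep
  split_ifs with h1 h2
  · exact Or.inl h1
  · exact Or.inr ⟨by omega, le_of_lt h2.2⟩
  · exact pvBetter_refl acc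

theorem pvStep_better_right (acc w : String) : pvBetter (pvStep acc w) w := by
  unfold pvStep
  split_ifs with h1 h2
  · exact pvBetter_refl w
  · exact pvBetter_refl w
  · rcases lt_trichotomy (PySem.Str.len w) (PySem.Str.len acc) with h | h | h
    · exact Or.inl h
    · exact Or.inr ⟨by omega, by
        by_contra hle
        exact h2 ⟨by omega, lt_of_not_ge hle⟩⟩
    · omega

theorem pvStep_mem (acc w : String) : pvStep acc w = acc ∨ pvStep acc w = w := by
  unfold pvStep; split_ifs <;> simp

-- loop invariant for A's fold
theorem pvFold_spec (ws : List String) (acc : String) :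
    (ws.foldl pvStep acc = acc ∨ ws.foldl pvStep acc ∈ ws) ∧
    pvBetter (ws.foldl pvStep acc) acc ∧
    (∀ w ∈ ws, pvBetter (ws.foldl pvStep acc) w) := by
  induction ws generalizing acc with
  | nil => exact ⟨Or.inl rfl, pvBetter_refl acc, by simp⟩
  | cons w ws ih =>
    obtain ⟨hmem, hacc, hall⟩ := ih (pvStep acc w)
    have hL : pvBetter (ws.foldl pvStep (pvStep acc w)) acc :=
      pvBetter_trans hacc (pvStep_better_left acc w)
    have hR : pvBetter (ws.foldl pvStep (pvStep acc w)) w :=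
      pvBetter_trans hacc (pvStep_better_right acc w)
    simp only [List.foldl_cons]
    refine ⟨?_, hL, ?_⟩
    · rcases hmem with h | h
      · rcases pvStep_mem acc w with h' | h'
        · exact Or.inl (h.trans h')
        · exact Or.inr (List.mem_cons.mpr (Or.inl (h.trans h')))
      · exact Or.inr (List.mem_cons_of_mem w h)
    · intro v hv
      rcases List.mem_cons.mp hv with rfl | hv
      · exact hR
      · exact hall v hv

theorem pvLen_zero_eq_empty {s : String} (h : PySem.Str.len s = 0) : s = "" := by
  rw [PySem.Str.len_eq] at h
  have h' : s.toList = [] := by simpa using h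
  have := congrArg String.ofList h'
  simpa using this

-- B's result is a member of sp and best (when sp ≠ [])
theorem pvAlt_spec (sp : List String) (hne : sp ≠ []) :
    (PySem.List.minD (sp.filter (fun w => PySem.Str.len w == PySem.List.maxD (sp.map PySem.Str.len) (fun x => x) 0)) (fun w => w) "") ∈ sp ∧
    ∀ w ∈ sp, pvBetter (PySem.List.minD (sp.filter (fun w => PySem.Str.len w == PySem.List.maxD (sp.map PySem.Str.len) (fun x => x) 0)) (fun w => w) "") w := by
  set key : Int → Int := fun x => x
  obtain ⟨ml, hml⟩ : ∃ ml, PySem.List.max? (sp.map PySem.Str.len) key = some ml := by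
    cases h : PySem.List.max? (sp.map PySem.Str.len) key with
    | none => exact absurd (by simpa using (PySem.List.max?_eq_none_iff _ _).mp h) hne
    | some m => exact ⟨m, rfl⟩
  have hmlD : PySem.List.maxD (sp.map PySem.Str.len) key 0 = ml := by
    simp [PySem.List.maxD, hml]
  have hmlMem : ml ∈ sp.map PySem.Str.len := PySem.List.max?_mem hml
  have hmlMax : ∀ y ∈ sp.map PySem.Str.len, y ≤ ml := fun y hy => PySem.List.max?_isMax hml y hy
  obtain ⟨w0, hw0, hw0l⟩ := List.mem_map.mp hmlMem
  have hfne : sp.filter (fun w => PySem.Str.len w == PySem.List.maxD (sp.map PySem.Str.len) key 0) ≠ [] := by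
    intro h
    have : w0 ∈ sp.filter (fun w => PySem.Str.len w == PySem.List.maxD (sp.map PySem.Str.len) key 0) :=
      List.mem_filter.mpr ⟨hw0, by rw [hmlD]; simpa using hw0l⟩
    rw [h] at this
    simp at this
  obtain ⟨r, hr⟩ : ∃ r, PySem.List.min? (sp.filter (fun w => PySem.Str.len w == PySem.List.maxD (sp.map PySem.Str.len) key 0)) (fun w => w) = some r := by
    cases h : PySem.List.min? (sp.filter (fun w => PySem.Str.len w == PySem.List.maxD (sp.map PySem.Str.len) key 0)) (fun w => w) with
    | none => exact absurd ((PySem.List.min?_eq_none_iff _ _).mp h) hfne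
    | some m => exact ⟨m, rfl⟩
  have hrD : PySem.List.minD (sp.filter (fun w => PySem.Str.len w == PySem.List.maxD (sp.map PySem.Str.len) key 0)) (fun w => w) "" = r := by
    simp only [PySem.List.minD]
    rw [hr]
    rfl
  have hrMemF := PySem.List.min?_mem hr
  have hrMin : ∀ y ∈ sp.filter (fun w => PySem.Str.len w == PySem.List.maxD (sp.map PySem.Str.len) key 0), r ≤ y :=
    fun y hy => PySem.List.min?_isMin hr y hy
  obtain ⟨hrSp, hrLen⟩ := List.mem_filter.mp hrMemF
  have hrLen' : PySem.Str.len r = ml := by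
    have := of_decide_eq_true hrLen
    simpa [hmlD] using this
  rw [hrD]
  refine ⟨hrSp, ?_⟩
  intro w hw
  have hwle : PySem.Str.len w ≤ ml := hmlMax _ (List.mem_map.mpr ⟨w, hw, rfl⟩)
  rcases eq_or_lt_of_le hwle with heq | hlt
  · have hwF : w ∈ sp.filter (fun w => PySem.Str.len w == PySem.List.maxD (sp.map PySem.Str.len) key 0) :=
      List.mem_filter.mpr ⟨hw, by rw [hmlD]; simpa using heq⟩
    exact Or.inr ⟨by omega, hrMin w hwF⟩
  · exact Or.inl (by omega)

-- ===== VERDICT (by name: the statement is the Claim_ definition above) =====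
theorem longest_dragon_spec : Claim_equal_longest_dragon := by
  intro text _
  unfold Spec_longest_dragon longest_dragon longest_dragon_alt
  cases hsp : PySem.Str.split₀ text with
  | nil => simp [PySem.List.minD, PySem.List.min?]
  | cons x xs =>
    set sp := x :: xs with hspdef
    have hne : sp ≠ [] := by simp [hspdef]
    obtain ⟨hmemA, _, hallA⟩ := pvFold_spec sp ""
    obtain ⟨hmemB, hallB⟩ := pvAlt_spec sp hne
    set rA := sp.foldl pvStep "" with hrA
    set rB := PySem.List.minD (sp.filter (fun w => PySem.Str.len w == PySem.List.maxD (sp.map PySem.Str.len) (fun x => x) 0)) (fun w => w) "" with hrB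
    rcases hmemA with hA0 | hAmem
    · -- rA = "": by hallA every word of sp has length 0, so rB = "" too
      have hnn : 0 ≤ PySem.Str.len rB := by simp [PySem.Str.len_eq]
      have h0 : PySem.Str.len ("" : String) = 0 := by decide
      rcases hallA rB hmemB with hlt | ⟨hlen, _⟩
      · rw [hA0, h0] at hlt
        omega
      · rw [hA0, h0] at hlen
        rw [hA0, pvLen_zero_eq_empty hlen.symm]
    · exact pvBetter_antisymm (hallA rB hmemB) (hallB rA hAmem)
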